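-- pv_equiv track=rewrite | github.com/NQBH/advanced_STEM_beyond | combinatorics/resource/LCHP/problem_LTDT_code/bai_4/bai4.py | map_to_list
-- ===== SOURCE A (Python) =====
-- from typing import List, Dict, Tuple
--
-- def map_to_list(adj_map: Dict[int, List[int]]) -> List[List[int]]:
--     """Chuyển map kề thành danh sách kề"""
--     if not adj_map:
--         return []
--
--     max_vertex = 0
--     for vertex, neighbors in adj_map.items():
--         max_vertex = max(max_vertex, vertex)
--         for neighbor in neighbors:
--             max_vertex = max(max_vertex, neighbor)
--
--     adj_list = [[] for _ in range(max_vertex + 1)]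
--     for vertex, neighbors in adj_map.items():
--         adj_list[vertex] = neighbors.copy()
--
--     return adj_list
-- ===== SOURCE B (Python) =====
-- def map_to_list(adj_map):
--     """Chuyển map kề thành danh sách kề"""
--     if not adj_map:
--         return []
--     size = 1 + max(max(adj_map),
--                    max((x for ns in adj_map.values() for x in ns), default=0))
--     out = []
--     for vertex in sorted(adj_map):
--         out.extend([] for _ in range(vertex - len(out)))
--         out.append(adj_map[vertex].copy())
--     out.extend([] for _ in range(size - len(out)))
--     return out
-- ===== Notes on version B (the rewrite author's own statement) =====
-- stated objective: alternative
-- what changed: B sorts the vertices and emits the adjacency list sequentially left to right, padding index gaps with empty lists as it goes, instead of A's preallocating max_vertex+1 empty slots and assigning each entry by random-access index; Pre_ restricts to the natural domain of an adjacency map — nonnegative, pairwise-distinct vertex keys — because a negative vertex has no slot in an adjacency list (A raises IndexError on most negative keys and otherwise stores the entry counted from the end of the list, while B emits it in sorted order).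
-- outside the precondition, e.g. on map_to_list({-1: [3]}): A returns [[], [], [], [3]], B returns [[3], [], [], []]
import Mathlib
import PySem

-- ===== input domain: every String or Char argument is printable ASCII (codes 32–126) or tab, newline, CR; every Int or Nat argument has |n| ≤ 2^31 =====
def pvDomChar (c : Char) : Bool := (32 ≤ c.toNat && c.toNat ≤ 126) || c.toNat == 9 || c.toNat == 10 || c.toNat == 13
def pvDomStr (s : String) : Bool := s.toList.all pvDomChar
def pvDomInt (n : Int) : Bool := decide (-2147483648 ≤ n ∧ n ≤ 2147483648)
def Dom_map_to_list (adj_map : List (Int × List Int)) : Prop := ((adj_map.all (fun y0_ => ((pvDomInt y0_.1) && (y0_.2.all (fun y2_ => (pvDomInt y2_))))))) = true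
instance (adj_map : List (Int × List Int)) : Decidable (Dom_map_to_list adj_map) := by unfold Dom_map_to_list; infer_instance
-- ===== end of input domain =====

-- B converts the map by sorting its vertices and emitting the adjacency list left to right,
-- filling index gaps with empty lists as it goes (objective: alternative — sequential emission
-- instead of A's allocate-then-assign-by-index).


-- ===== PORT A =====
def map_to_list (adj_map : List (Int × List Int)) : List (List Int) :=
  if adj_map = [] then []
  else
    let max_vertex : Int :=
      adj_map.foldl (fun mv p => p.2.foldl (fun m n => max m n) (max mv p.1)) 0
    let adj_list : List (List Int) :=
      (PySem.List.pyRange 0 (max_vertex + 1) 1).map (fun _ => ([] : List Int))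
    -- adj_list[vertex] = neighbors.copy(): pySetD resolves the index exactly as Python
    -- (the negative / out-of-range cases lie outside Pre_)
    adj_map.foldl (fun acc p => PySem.List.pySetD acc p.1 p.2) adj_list

-- ===== PORT B =====
def map_to_list_alt (adj_map : List (Int × List Int)) : List (List Int) :=
  if adj_map = [] then []
  else
    -- size = 1 + max(max(adj_map), max(neighbors, default=0)); max(adj_map) is over the
    -- (nonempty, guarded above) keys, so the .getD 0 branch of max? is unreachable
    let size : Int :=
      1 + max ((PySem.List.max? (adj_map.map Prod.fst) (fun x => x)).getD 0)
              (PySem.List.maxD (adj_map.flatMap (fun p => p.2)) (fun x => x) 0)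
    let out : List (List Int) :=
      (PySem.List.sorted (adj_map.map Prod.fst) (fun x => x) false).foldl
        (fun out v =>
          (out ++ List.replicate ((v - (out.length : Int)).toNat) ([] : List Int))
            ++ [(PySem.Dict.mk adj_map).getD v []])
        []
    out ++ List.replicate ((size - (out.length : Int)).toNat) ([] : List Int)

-- ===== PRECONDITION & SPEC =====
-- Pre_ restricts to the natural domain of an adjacency map: vertex keys are nonnegative and
-- pairwise distinct. A negative vertex has no slot in an adjacency list, so such inputs are
-- outside the function's intended domain (A raises IndexError on most of them, and otherwise
-- stores the entry counted from the end of the list); duplicate keys cannot arise from a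
-- Python dict.
def Pre_map_to_list (adj_map : List (Int × List Int)) : Prop :=
  (adj_map.map Prod.fst).Nodup ∧ ∀ p ∈ adj_map, 0 ≤ p.1
instance (adj_map : List (Int × List Int)) : Decidable (Pre_map_to_list adj_map) := by
  unfold Pre_map_to_list; infer_instance
def pvWitness_map_to_list : (List (Int × List Int)) := [(0, [2, 5]), (2, []), (5, [0, -3])]

def Spec_map_to_list (adj_map : List (Int × List Int)) (out : List (List Int)) : Prop := out = map_to_list_alt adj_map
instance (adj_map : List (Int × List Int)) (out : List (List Int)) : Decidable (Spec_map_to_list adj_map out) := by unfold Spec_map_to_list; infer_instance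

-- ===== CLAIM (what is proved, stated in full; the proofs are below) =====
def Claim_equal_map_to_list : Prop := ∀ (adj_map : List (Int × List Int)), Dom_map_to_list adj_map → Pre_map_to_list adj_map → Spec_map_to_list adj_map (map_to_list adj_map)

-- ===== LEMMAS AND PROOFS =====

-- A's interleaved running max is the running max over the flattened key::neighbors stream
theorem maxA_eq (l : List (Int × List Int)) (a : Int) :
    l.foldl (fun mv p => p.2.foldl (fun m n => max m n) (max mv p.1)) a
      = (l.flatMap (fun p => p.1 :: p.2)).foldl max a := by
  induction l generalizing a with
  | nil => rfl
  | cons p rest ih => simp [List.foldl_append, ih]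

theorem foldl_max_le (l : List Int) : ∀ (a c : Int), a ≤ c → (∀ x ∈ l, x ≤ c) →
    l.foldl max a ≤ c := by
  induction l with
  | nil => intro a c h0 _; exact h0
  | cons x rest ih =>
    intro a c h0 h
    exact ih _ _ (max_le h0 (h x List.mem_cons_self)) (fun y hy => h y (List.mem_cons_of_mem _ hy))

theorem mem_le_foldl_max (l : List Int) (a x : Int) (h : x ∈ a :: l) : x ≤ l.foldl max a := by
  rcases List.mem_cons.mp h with rfl | h
  · exact (PySem.List.le_foldl_max l x).1
  · exact (PySem.List.le_foldl_max l a).2 x h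

-- under Pre_, A's size max_vertex + 1 equals B's size
theorem size_eq (l : List (Int × List Int)) (hne : l ≠ [])
    (hk : ∀ p ∈ l, 0 ≤ p.1) :
    (l.flatMap (fun p => p.1 :: p.2)).foldl max 0
      = max ((PySem.List.max? (l.map Prod.fst) (fun x => x)).getD 0)
            (PySem.List.maxD (l.flatMap (fun p => p.2)) (fun x => x) 0) := by
  rcases hkeys : l.map Prod.fst with _ | ⟨k0, krest⟩
  · exact absurd (List.map_eq_nil_iff.mp hkeys) hne
  have hk' : ∀ x ∈ l.map Prod.fst, 0 ≤ x := by
    intro x hx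
    obtain ⟨p, hp, rfl⟩ := List.mem_map.mp hx
    exact hk p hp
  have hkey_flat : ∀ x ∈ l.map Prod.fst, x ∈ l.flatMap (fun p => p.1 :: p.2) := by
    intro x hx
    obtain ⟨p, hp, rfl⟩ := List.mem_map.mp hx
    exact List.mem_flatMap.mpr ⟨p, hp, List.mem_cons_self⟩
  have hnbr_flat : ∀ x ∈ l.flatMap (fun p => p.2), x ∈ l.flatMap (fun p => p.1 :: p.2) := by
    intro x hx
    obtain ⟨p, hp, hxp⟩ := List.mem_flatMap.mp hx
    exact List.mem_flatMap.mpr ⟨p, hp, List.mem_cons_of_mem _ hxp⟩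
  rw [PySem.List.max?_id_cons, Option.getD_some]
  set Mk : Int := krest.foldl max k0 with hMk
  have hk0 : 0 ≤ k0 := hk' k0 (hkeys ▸ List.mem_cons_self)
  have hMk0 : 0 ≤ Mk := le_trans hk0 (PySem.List.le_foldl_max krest k0).1
  have hkeyMk : ∀ x ∈ l.map Prod.fst, x ≤ Mk := by
    intro x hx; exact mem_le_foldl_max krest k0 x (hkeys ▸ hx)
  apply le_antisymm
  · -- running max ≤ max Mk Mn
    apply foldl_max_le _ _ _ (le_max_of_le_left hMk0)
    intro x hx
    obtain ⟨p, hp, hxp⟩ := List.mem_flatMap.mp hx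
    rcases List.mem_cons.mp hxp with rfl | hxn
    · exact le_max_of_le_left (hkeyMk p.1 (List.mem_map.mpr ⟨p, hp, rfl⟩))
    · -- x is a neighbor: x ≤ Mn, the nonempty-case max
      have hxmem : x ∈ l.flatMap (fun p => p.2) := List.mem_flatMap.mpr ⟨p, hp, hxn⟩
      rcases hnb : l.flatMap (fun p => p.2) with _ | ⟨n0, nrest⟩
      · simp [hnb] at hxmem
      · refine le_max_of_le_right ?_
        unfold PySem.List.maxD
        rw [hnb, PySem.List.max?_id_cons, Option.getD_some]
        exact mem_le_foldl_max nrest n0 x (hnb ▸ hxmem)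
  · -- max Mk Mn ≤ running max
    apply max_le
    · apply foldl_max_le
      · exact (PySem.List.le_foldl_max _ 0).2 k0 (hkey_flat k0 (hkeys ▸ List.mem_cons_self))
      · intro x hx
        exact (PySem.List.le_foldl_max _ 0).2 x
          (hkey_flat x (hkeys ▸ List.mem_cons_of_mem _ hx))
    · rcases hnb : l.flatMap (fun p => p.2) with _ | ⟨n0, nrest⟩
      · simpa [PySem.List.maxD, hnb] using (PySem.List.le_foldl_max (l.flatMap (fun p => p.1 :: p.2)) 0).1
      · unfold PySem.List.maxD
        rw [hnb, PySem.List.max?_id_cons, Option.getD_some]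
        apply foldl_max_le
        · exact (PySem.List.le_foldl_max _ 0).2 n0 (hnbr_flat n0 (hnb ▸ List.mem_cons_self))
        · intro x hx
          exact (PySem.List.le_foldl_max _ 0).2 x
            (hnbr_flat x (hnb ▸ List.mem_cons_of_mem _ hx))

theorem length_fold_set (l : List (Int × List Int)) (acc : List (List Int)) :
    (l.foldl (fun acc p => PySem.List.pySetD acc p.1 p.2) acc).length = acc.length := by
  induction l generalizing acc with
  | nil => rfl
  | cons p rest ih => simp [List.foldl_cons, ih, PySem.List.length_pySetD]

-- A's assignment loop: with distinct nonnegative in-range keys, slot i ends up holding the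
-- dict's value at i (or the initial cell when i is no key)
theorem fold_set_get (l : List (Int × List Int)) (acc : List (List Int))
    (hnd : (l.map Prod.fst).Nodup)
    (hk : ∀ p ∈ l, 0 ≤ p.1 ∧ p.1 < (acc.length : Int))
    (i : Nat) (hi : i < acc.length) :
    (l.foldl (fun acc p => PySem.List.pySetD acc p.1 p.2) acc)[i]'(by
        rw [length_fold_set]; exact hi)
      = ((PySem.Dict.mk l).get? (i : Int)).getD (acc[i]'hi) := by
  induction l generalizing acc with
  | nil => simp [PySem.Dict.get?]
  | cons p rest ih =>
    obtain ⟨hlo, hhi⟩ := hk _ (List.mem_cons_self)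
    have hnd' : p.1 ∉ rest.map Prod.fst ∧ (rest.map Prod.fst).Nodup := by
      rw [List.map_cons, List.nodup_cons] at hnd; exact hnd
    have hnat : p.1.toNat < acc.length := by omega
    simp only [List.foldl_cons, PySem.List.pySetD_of_nonneg _ _ hlo]
    have hi' : i < (acc.set p.1.toNat p.2).length := by simpa using hi
    rw [ih (acc.set p.1.toNat p.2) hnd'.2
      (fun q hq => by simpa using hk q (List.mem_cons_of_mem _ hq)) hi']
    rw [PySem.Dict.get?_mk_cons]
    by_cases hpi : p.1 = (i : Int)
    · have hrest : (PySem.Dict.mk rest).get? (i : Int) = none := by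
        rw [PySem.Dict.get?_eq_none_iff_not_mem_keys]
        simpa [PySem.Dict.keys, hpi] using hnd'.1
      have hti : p.1.toNat = i := by omega
      simp [hpi, hrest]
    · have : p.1.toNat ≠ i := by omega
      simp [hpi, List.getElem_set_ne this]

-- B's emission loop, padded to `stop`, writes out exactly f over [out.length, stop)
theorem loopB (f : Int → List Int) (ks : List Int) : ∀ (out : List (List Int)) (stop : Int),
    ks.Pairwise (· < ·) →
    (∀ k ∈ ks, (out.length : Int) ≤ k) →
    (∀ i : Int, (out.length : Int) ≤ i → i < stop → i ∉ ks → f i = []) →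
    (∀ k ∈ ks, k < stop) →
    (out.length : Int) ≤ stop →
    (ks.foldl (fun out v =>
        (out ++ List.replicate ((v - (out.length : Int)).toNat) ([] : List Int)) ++ [f v]) out)
      ++ List.replicate
          ((stop - ((ks.foldl (fun out v =>
              (out ++ List.replicate ((v - (out.length : Int)).toNat) ([] : List Int)) ++ [f v])
              out).length : Int)).toNat) ([] : List Int)
      = out ++ (PySem.List.pyRange (out.length : Int) stop 1).map f := by
  induction ks with
  | nil =>
    intro out stop hst hlo hgap hstop hle
    simp only [List.foldl_nil]
    congr 1
    have hall : ∀ b ∈ (PySem.List.pyRange (out.length : Int) stop 1).map f, b = ([] : List Int) := by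
      intro b hb
      obtain ⟨x, hx, rfl⟩ := List.mem_map.mp hb
      obtain ⟨h1, h2⟩ := (PySem.List.mem_pyRange_one).mp hx
      exact hgap x h1 h2 (List.not_mem_nil)
    rw [List.eq_replicate_of_mem hall]
    congr 1
    simp [PySem.List.length_pyRange_one]
  | cons k kt ih =>
    intro out stop hst hlo hgap hstop hle
    have hk_lo := hlo k List.mem_cons_self
    have hk_hi := hstop k List.mem_cons_self
    set out' : List (List Int) :=
      (out ++ List.replicate ((k - (out.length : Int)).toNat) ([] : List Int)) ++ [f k] with hout'
    have hlen' : (out'.length : Int) = k + 1 := by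
      simp [hout']; omega
    have hkt_lt : ∀ k' ∈ kt, k < k' := fun k' hk' => (List.pairwise_cons.mp hst).1 k' hk'
    have ihh := ih out' stop (List.pairwise_cons.mp hst).2
      (fun k' hk' => by rw [hlen']; exact_mod_cast hkt_lt k' hk')
      (fun i h1 h2 hni => hgap i (by rw [hlen'] at h1; omega) h2
        (by intro hmem; rcases List.mem_cons.mp hmem with rfl | h
            · rw [hlen'] at h1; omega
            · exact hni h))
      (fun k' hk' => hstop k' (List.mem_cons_of_mem _ hk'))
      (by rw [hlen']; omega)
    simp only [List.foldl_cons, ← hout']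
    rw [ihh, hlen']
    rw [PySem.List.pyRange_one_append (out.length : Int) k stop hk_lo (by omega),
        PySem.List.pyRange_one_append k (k + 1) stop (by omega) (by omega),
        PySem.List.pyRange_one_singleton]
    have hgapmap : (PySem.List.pyRange (out.length : Int) k 1).map f
        = List.replicate ((k - (out.length : Int)).toNat) ([] : List Int) := by
      have hall : ∀ b ∈ (PySem.List.pyRange (out.length : Int) k 1).map f, b = ([] : List Int) := by
        intro b hb
        obtain ⟨x, hx, rfl⟩ := List.mem_map.mp hb
        obtain ⟨h1, h2⟩ := (PySem.List.mem_pyRange_one).mp hx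
        refine hgap x h1 (by omega) ?_
        intro hmem
        rcases List.mem_cons.mp hmem with rfl | h
        · omega
        · exact absurd (hkt_lt x h) (by omega)
      rw [List.eq_replicate_of_mem hall]
      congr 1
      simp [PySem.List.length_pyRange_one]
    simp [hout', hgapmap]

-- ===== VERDICT (by name: the statement is the Claim_ definition above) =====
theorem map_to_list_spec : Claim_equal_map_to_list := by
  intro adj_map _hdom hpre
  obtain ⟨hnd, hnn⟩ := hpre
  unfold Spec_map_to_list map_to_list map_to_list_alt
  by_cases hnil : adj_map = []
  · simp [hnil]
  · simp only [if_neg hnil]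
    set M : Int :=
      adj_map.foldl (fun mv p => p.2.foldl (fun m n => max m n) (max mv p.1)) 0 with hM
    have hMflat : M = (adj_map.flatMap (fun p => p.1 :: p.2)).foldl max 0 := maxA_eq _ _
    have hM0 : 0 ≤ M := hMflat ▸ (PySem.List.le_foldl_max _ 0).1
    have hsize : 1 + max ((PySem.List.max? (adj_map.map Prod.fst) (fun x => x)).getD 0)
        (PySem.List.maxD (adj_map.flatMap (fun p => p.2)) (fun x => x) 0) = M + 1 := by
      rw [hMflat, size_eq adj_map hnil hnn]; ring
    have hkeyM : ∀ p ∈ adj_map, p.1 ≤ M := by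
      intro p hp
      rw [hMflat]
      exact (PySem.List.le_foldl_max _ 0).2 p.1
        (List.mem_flatMap.mpr ⟨p, hp, List.mem_cons_self⟩)
    rw [hsize]
    -- A side: elementwise value of the assignment loop
    set init : List (List Int) :=
      (PySem.List.pyRange 0 (M + 1) 1).map (fun _ => ([] : List Int)) with hinit
    have hinitlen : (init.length : Int) = M + 1 := by
      simp [hinit, PySem.List.length_pyRange_one]; omega
    -- B side via loopB
    set f : Int → List Int := fun i => (PySem.Dict.mk adj_map).getD i [] with hf
    set ks : List Int := PySem.List.sorted (adj_map.map Prod.fst) (fun x => x) false with hks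
    have hksmem : ∀ x, x ∈ ks ↔ x ∈ adj_map.map Prod.fst := by
      intro x; exact PySem.List.mem_sorted (adj_map.map Prod.fst) (fun x => x) false x
    have hkspw : ks.Pairwise (· < ·) := by
      have h1 : ks.Pairwise (· ≤ ·) :=
        PySem.List.sorted_pairwise (adj_map.map Prod.fst) (fun x => x)
      have h2 : ks.Nodup :=
        (PySem.List.sorted_perm (adj_map.map Prod.fst) (fun x => x) false).nodup_iff.mpr hnd
      exact (h1.and h2).imp (fun h => lt_of_le_of_ne h.1 h.2)
    have hloopB := loopB f ks [] (M + 1) hkspw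
      (by intro k hk
          obtain ⟨p, hp, rfl⟩ := List.mem_map.mp ((hksmem k).mp hk)
          simpa using hnn p hp)
      (by intro i _ _ hni
          have : i ∉ adj_map.map Prod.fst := fun h => hni ((hksmem i).mpr h)
          rw [hf]
          exact PySem.Dict.getD_of_get?_eq_none _ _
            ((PySem.Dict.get?_eq_none_iff_not_mem_keys _ _).mpr
              (by simpa [PySem.Dict.keys] using this)))
      (by intro k hk
          obtain ⟨p, hp, rfl⟩ := List.mem_map.mp ((hksmem k).mp hk)
          have := hkeyM p hp; omega)
      (by simp; omega)
    simp only [List.length_nil, Nat.cast_zero, List.nil_append] at hloopB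
    rw [hloopB]
    -- both sides are (pyRange 0 (M+1)).map f
    apply List.ext_getElem
    · rw [length_fold_set]
      simp [PySem.List.length_pyRange_one]
      omega
    · intro i h1 h2
      have hi : i < init.length := by rw [length_fold_set] at h1; exact h1
      rw [fold_set_get adj_map init hnd
        (fun p hp => ⟨hnn p hp, by rw [hinitlen]; have := hkeyM p hp; omega⟩) i hi]
      simp only [List.getElem_map, PySem.List.getElem_pyRange_one, hf,
        PySem.Dict.getD_eq_get?_getD, zero_add]
      simp [hinit]
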